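-- pv_equiv track=rewrite | github.com/chieping/atcoder-chieping | typical90/082/main2.py | count
-- ===== SOURCE A (Python) =====
-- MOD = 10**9+7
--
-- def count(n):
--     if n == 0:
--         return 0
--     length = len(str(n))
--     start = 10**(length-1)
--     end = n
--     res = (start+end)*(end-start+1)//2*length
--     res %= MOD
--     return res + count(start-1)
-- ===== SOURCE B (Python) =====
-- MOD = 10**9+7
--
-- def count(n):
--     if n <= 0:
--         return 0
--     total = 0
--     L = 1
--     p = 1  # p == 10**(L-1)
--     while p <= n:
--         start = p
--         p *= 10
--         end = n if n < p else p - 1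
--         total += (start + end) * (end - start + 1) // 2 * L % MOD
--         L += 1
--     return total
-- ===== Notes on version B (the rewrite author's own statement) =====
-- stated objective: simpler
-- what changed: Replaced the descending recursion (peel the top digit-length block via len(str(n)) and recurse on the largest shorter number) with a single ascending while-loop over digit lengths that tracks the power of ten by multiplication, never calling str or recursing; Pre_ restricts to the natural domain of nonnegative n, where for negative n (unspecified for this digit-length sum) A applies its block formula to the '-'-signed string length while B returns the empty sum.
-- outside the precondition, e.g. on count(-5): A returns 999999982, B returns 0
import Mathlib
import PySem

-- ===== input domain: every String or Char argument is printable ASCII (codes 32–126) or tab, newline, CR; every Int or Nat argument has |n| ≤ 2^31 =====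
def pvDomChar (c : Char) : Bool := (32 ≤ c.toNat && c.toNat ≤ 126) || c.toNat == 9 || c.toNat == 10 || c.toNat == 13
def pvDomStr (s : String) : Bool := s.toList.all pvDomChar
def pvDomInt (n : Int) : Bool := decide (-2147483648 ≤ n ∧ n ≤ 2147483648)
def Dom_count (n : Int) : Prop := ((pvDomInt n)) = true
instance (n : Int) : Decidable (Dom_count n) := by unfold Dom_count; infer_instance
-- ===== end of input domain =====

-- B replaces A's descending per-digit-length recursion (via len(str(n))) by one ascending loop over
-- digit lengths that tracks the power of ten by multiplication; objective: simpler (no str, no recursion).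

def pvMOD : Int := 10 ^ 9 + 7

-- ===== PORT A =====
-- literal transliteration of A's recursion; the fuel argument only makes it total (64 is ample on Dom)
def countFuel : Nat → Int → Int
  | 0, _ => 0
  | f + 1, n =>
    if n = 0 then 0
    else
      let length : Int := PySem.Str.len (PySem.Int.toStr n)
      let start : Int := 10 ^ (length - 1).toNat   -- length - 1 ≥ 0 always; toNat is exact here
      let res := PySem.Int.mod (PySem.Int.floordiv ((start + n) * (n - start + 1)) 2 * length) pvMOD
      res + countFuel f (start - 1)

def count (n : Int) : Int := countFuel 64 n

-- ===== PORT B =====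
-- literal transliteration of Source B's while-loop; fuel only makes it total (64 is ample on Dom)
def altLoop : Nat → Int → Int → Int → Int → Int
  | 0, _, _, _, total => total
  | f + 1, n, p, L, total =>
    if p ≤ n then
      let start := p
      let p' := p * 10
      let e := if n < p' then n else p' - 1
      altLoop f n p' (L + 1)
        (total + PySem.Int.mod (PySem.Int.floordiv ((start + e) * (e - start + 1)) 2 * L) pvMOD)
    else total

def count_alt (n : Int) : Int := if n ≤ 0 then 0 else altLoop 64 n 1 1 0

-- ===== PRECONDITION & SPEC =====
-- Pre_ restricts to the function's natural domain of nonnegative n (it sums i*len(str(i)) over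
-- i up to n); for negative n no caller specifies a value: A applies its block formula to the
-- '-'-signed string length, while B returns the empty sum.
def Pre_count (n : Int) : Prop := 0 ≤ n
instance (n : Int) : Decidable (Pre_count n) := by unfold Pre_count; infer_instance
def pvWitness_count : Int := 42

def Spec_count (n : Int) (out : Int) : Prop := out = count_alt n
instance (n : Int) (out : Int) : Decidable (Spec_count n out) := by unfold Spec_count; infer_instance

-- ===== CLAIM (what is proved, stated in full; the proofs are below) =====
def Claim_equal_count : Prop := ∀ (n : Int), Dom_count n → Pre_count n → Spec_count n (count n)

-- ===== LEMMAS AND PROOFS =====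

-- the (reduced) value contributed by the block of numbers of digit length L, as both programs compute it
def blockTerm (n : Int) (L : Nat) : Int :=
  PySem.Int.mod
    (PySem.Int.floordiv
      (((10 : Int) ^ (L - 1) + min n ((10 : Int) ^ L - 1)) *
        (min n ((10 : Int) ^ L - 1) - (10 : Int) ^ (L - 1) + 1)) 2 * (L : Int)) pvMOD

-- sum of blockTerm n L, blockTerm n (L+1), …, k terms
def partSum (n : Int) (L : Nat) : Nat → Int
  | 0 => 0
  | k + 1 => blockTerm n L + partSum n (L + 1) k

lemma partSum_succ_right (n : Int) : ∀ (k L : Nat),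
    partSum n L (k + 1) = partSum n L k + blockTerm n (L + k) := by
  intro k
  induction k with
  | zero => intro L; simp [partSum]
  | succ k ih =>
      intro L
      show blockTerm n L + partSum n (L + 1) (k + 1) = partSum n L (k + 1) + blockTerm n (L + (k + 1))
      rw [ih (L + 1)]
      show blockTerm n L + (partSum n (L + 1) k + blockTerm n (L + 1 + k)) = _
      have : L + 1 + k = L + (k + 1) := by omega
      rw [this]
      show _ = blockTerm n L + partSum n (L + 1) k + blockTerm n (L + (k + 1))
      ring

lemma pow_ten_le_pow_ten {a b : Nat} (h : a ≤ b) : (10 : Int) ^ a ≤ 10 ^ b :=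
  pow_le_pow_right₀ (by norm_num) h

-- the first k terms only depend on n through full blocks once n is large enough
lemma partSum_congr (m m' : Int) : ∀ (k L : Nat),
    (10 : Int) ^ (L + k - 1) - 1 ≤ m → (10 : Int) ^ (L + k - 1) - 1 ≤ m' →
    partSum m L k = partSum m' L k := by
  intro k
  induction k with
  | zero => intro L _ _; rfl
  | succ k ih =>
      intro L hm hm'
      have hL : (10 : Int) ^ L ≤ 10 ^ (L + (k + 1) - 1) := pow_ten_le_pow_ten (by omega)
      have h1 : min m ((10 : Int) ^ L - 1) = (10 : Int) ^ L - 1 := min_eq_right (by omega)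
      have h2 : min m' ((10 : Int) ^ L - 1) = (10 : Int) ^ L - 1 := min_eq_right (by omega)
      show blockTerm m L + partSum m (L + 1) k = blockTerm m' L + partSum m' (L + 1) k
      rw [ih (L + 1) (by
            have : L + 1 + k - 1 = L + (k + 1) - 1 := by omega
            rw [this]; exact hm)
          (by
            have : L + 1 + k - 1 = L + (k + 1) - 1 := by omega
            rw [this]; exact hm'),
        blockTerm, blockTerm, h1, h2]

-- B's loop with exhausted condition returns the accumulator (any fuel)
lemma altLoop_stop (f : Nat) (n p L total : Int) (h : ¬ p ≤ n) :
    altLoop f n p L total = total := by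
  cases f with
  | zero => rfl
  | succ f => simp [altLoop, h]

-- one unfolding of B's loop, with the let-bindings substituted
lemma altLoop_step (f : Nat) (n p L total : Int) (h : p ≤ n) :
    altLoop (f + 1) n p L total =
      altLoop f n (p * 10) (L + 1)
        (total + PySem.Int.mod (PySem.Int.floordiv
          ((p + (if n < p * 10 then n else p * 10 - 1)) *
            ((if n < p * 10 then n else p * 10 - 1) - p + 1)) 2 * L) pvMOD) := by
  simp [altLoop, h]

-- B's loop computes the remaining part sums (k'+1 iterations remain when the digit count is L + k')
lemma altLoop_spec : ∀ (k' f L : Nat) (total n : Int), k' + 1 ≤ f → 1 ≤ L →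
    (10 : Int) ^ (L + k' - 1) ≤ n → n < (10 : Int) ^ (L + k') →
    altLoop f n ((10 : Int) ^ (L - 1)) (L : Int) total = total + partSum n L (k' + 1) := by
  intro k'
  induction k' with
  | zero =>
      intro f L total n hf hL hlo hhi
      obtain ⟨f, rfl⟩ : ∃ f', f = f' + 1 := ⟨f - 1, by omega⟩
      have hploe : (10 : Int) ^ (L - 1) ≤ n := by
        have : L - 1 ≤ L + 0 - 1 := by omega
        exact le_trans (pow_ten_le_pow_ten this) hlo
      have hpow : (10 : Int) ^ (L - 1) * 10 = 10 ^ L := by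
        rw [← pow_succ]; congr 1; omega
      rw [altLoop_step f n _ _ _ hploe, hpow]
      have hnlt : n < (10 : Int) ^ L := by simpa using hhi
      rw [if_pos hnlt]
      rw [altLoop_stop _ _ _ _ _ (by omega)]
      have hmin : min n ((10 : Int) ^ L - 1) = n := min_eq_left (by omega)
      rw [partSum, partSum, blockTerm, hmin]
      ring
  | succ k ih =>
      intro f L total n hf hL hlo hhi
      obtain ⟨f, rfl⟩ : ∃ f', f = f' + 1 := ⟨f - 1, by omega⟩
      have hpLle : (10 : Int) ^ L ≤ n := by
        exact le_trans (pow_ten_le_pow_ten (by omega : L ≤ L + (k + 1) - 1)) hlo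
      have hploe : (10 : Int) ^ (L - 1) ≤ n :=
        le_trans (pow_ten_le_pow_ten (by omega)) hpLle
      have hpow : (10 : Int) ^ (L - 1) * 10 = 10 ^ L := by
        rw [← pow_succ]; congr 1; omega
      rw [altLoop_step f n _ _ _ hploe, hpow, if_neg (by omega)]
      have hcast : ((L : Int) + 1) = ((L + 1 : Nat) : Int) := by simp
      have hLpow : (10 : Int) ^ L = 10 ^ (L + 1 - 1) := by simp
      rw [hcast, hLpow, ih f (L + 1) _ n (by omega) (by omega)
        (by rw [show L + 1 + k - 1 = L + (k + 1) - 1 from by omega]; exact hlo)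
        (by rw [show L + 1 + k = L + (k + 1) from by omega]; exact hhi)]
      have hmin : min n ((10 : Int) ^ L - 1) = (10 : Int) ^ L - 1 := min_eq_right (by omega)
      simp only [partSum, blockTerm, hmin, Nat.add_sub_cancel]
      push_cast
      ring

-- exact length of Lean-core's Nat.toDigits 10 (fuel-level induction over toDigitsCore)
lemma toDigitsCore_len_ten : ∀ (f m : Nat), m < f →
    (Nat.toDigitsCore 10 f m []).length = Nat.log 10 m + 1 := by
  intro f
  induction f with
  | zero => intro m h; omega
  | succ f ih =>
      intro m h
      rw [Nat.toDigitsCore]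
      by_cases h10 : m / 10 = 0
      · have hlt : m < 10 := by omega
        simp [h10, Nat.log_eq_zero_iff.mpr (Or.inl hlt)]
      · rw [if_neg h10, Nat.toDigitsCore_lens_eq, ih (m / 10) (by omega)]
        have hm : 10 ≤ m := by omega
        rw [Nat.log_div_base]
        have : 1 ≤ Nat.log 10 m := Nat.log_pos (by norm_num) hm
        omega

-- Python's len(str(n)) for positive n is the digit count
lemma len_toStr (n : Int) (h : 1 ≤ n) :
    PySem.Str.len (PySem.Int.toStr n) = ((Nat.log 10 n.toNat + 1 : Nat) : Int) := by
  rw [PySem.Str.len_eq, PySem.Int.toList_toStr, PySem.Int.toChars, if_neg (by omega)]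
  rw [Nat.toDigits]
  rw [toDigitsCore_len_ten (n.toNat + 1) n.toNat (by omega)]

-- one unfolding of A's recursion, with the let-bindings substituted
lemma countFuel_step (f : Nat) (n : Int) (h : ¬ n = 0) :
    countFuel (f + 1) n =
      PySem.Int.mod (PySem.Int.floordiv
        ((10 ^ (PySem.Str.len (PySem.Int.toStr n) - 1).toNat + n) *
          (n - 10 ^ (PySem.Str.len (PySem.Int.toStr n) - 1).toNat + 1)) 2 *
        PySem.Str.len (PySem.Int.toStr n)) pvMOD +
      countFuel f (10 ^ (PySem.Str.len (PySem.Int.toStr n) - 1).toNat - 1) := by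
  simp [countFuel, h]

-- A's recursion computes the same per-digit-length part sums
lemma countFuel_eq : ∀ (d f : Nat) (n : Int), 0 ≤ n → n < (10 : Int) ^ d → d + 1 ≤ f →
    countFuel f n = if n = 0 then 0 else partSum n 1 (Nat.log 10 n.toNat + 1) := by
  intro d
  induction d with
  | zero =>
      intro f n h0 hlt hf
      obtain ⟨f, rfl⟩ : ∃ f', f = f' + 1 := ⟨f - 1, by omega⟩
      have : n = 0 := by simpa using (by omega : n = 0)
      subst this
      simp [countFuel]
  | succ d ih =>
      intro f n h0 hlt hf
      obtain ⟨f, rfl⟩ : ∃ f', f = f' + 1 := ⟨f - 1, by omega⟩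
      by_cases hz : n = 0
      · subst hz; simp [countFuel]
      · rw [if_neg hz]
        have h1 : 1 ≤ n := by omega
        set D : Nat := Nat.log 10 n.toNat + 1 with hD
        have hlen : PySem.Str.len (PySem.Int.toStr n) = ((D : Nat) : Int) := len_toStr n h1
        have htn : ((PySem.Str.len (PySem.Int.toStr n) - 1)).toNat = D - 1 := by
          rw [hlen]; omega
        have hlo : (10 : Int) ^ (D - 1) ≤ n := by
          have := Nat.pow_log_le_self 10 (x := n.toNat) (by omega)
          have h2 : ((10 ^ Nat.log 10 n.toNat : Nat) : Int) ≤ ((n.toNat : Nat) : Int) := by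
            exact_mod_cast this
          rw [Int.toNat_of_nonneg h0] at h2
          simpa [hD, Nat.add_sub_cancel] using (by push_cast at h2 ⊢; exact h2 :
            (10 : Int) ^ Nat.log 10 n.toNat ≤ n)
        have hhi : n < (10 : Int) ^ D := by
          have := Nat.lt_pow_succ_log_self (by norm_num : 1 < 10) n.toNat
          have h2 : ((n.toNat : Nat) : Int) < ((10 ^ (Nat.log 10 n.toNat + 1) : Nat) : Int) := by
            exact_mod_cast this
          rw [Int.toNat_of_nonneg h0] at h2
          push_cast at h2
          simpa [hD] using h2
        have hDd : D ≤ d + 1 := by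
          have hnd : n.toNat < 10 ^ (d + 1) := by
            have : ((n.toNat : Nat) : Int) < ((10 ^ (d + 1) : Nat) : Int) := by
              rw [Int.toNat_of_nonneg h0]; push_cast; exact hlt
            exact_mod_cast this
          have := (Nat.log_lt_iff_lt_pow (by norm_num : 1 < 10) (by omega : n.toNat ≠ 0)).mpr hnd
          omega
        rw [countFuel_step f n hz, htn, hlen]
        have hres : PySem.Int.mod (PySem.Int.floordiv
            ((10 ^ (D - 1) + n) * (n - 10 ^ (D - 1) + 1)) 2 * ((D : Nat) : Int)) pvMOD
            = blockTerm n D := by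
          rw [blockTerm, min_eq_left (by omega)]
        rw [hres]
        by_cases hD1 : D = 1
        · have hs : (10 : Int) ^ (D - 1) - 1 = 0 := by rw [hD1]; norm_num
          rw [hs]
          rw [ih f 0 le_rfl (by positivity) (by omega)]
          rw [if_pos rfl, hD1]
          simp [partSum]
        · have hD2 : 2 ≤ D := by omega
          have hslo : (0 : Int) ≤ 10 ^ (D - 1) - 1 := by
            have : (1 : Int) ≤ 10 ^ (D - 1) := one_le_pow₀ (by norm_num)
            omega
          have hshi : (10 : Int) ^ (D - 1) - 1 < 10 ^ d := by
            have : (10 : Int) ^ (D - 1) ≤ 10 ^ d := pow_ten_le_pow_ten (by omega)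
            omega
          rw [ih f _ hslo hshi (by omega)]
          have hsne : ¬ ((10 : Int) ^ (D - 1) - 1 = 0) := by
            have : (10 : Int) ^ 1 ≤ 10 ^ (D - 1) := pow_ten_le_pow_ten (by omega)
            simp at this ⊢
            omega
          rw [if_neg hsne]
          have htn2 : ((10 : Int) ^ (D - 1) - 1).toNat = 10 ^ (D - 1) - 1 := by
            have : ((10 : Int) ^ (D - 1)) = ((10 ^ (D - 1) : Nat) : Int) := by push_cast; ring
            omega
          have hlog : Nat.log 10 (10 ^ (D - 1) - 1) = D - 2 := by
            rw [Nat.log_eq_iff (Or.inr ⟨by norm_num, by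
              have : 10 ^ 1 ≤ 10 ^ (D - 1) := Nat.pow_le_pow_right (by norm_num) (by omega)
              omega⟩)]
            constructor
            · have : 10 ^ (D - 2) < 10 ^ (D - 1) := Nat.pow_lt_pow_right (by norm_num) (by omega)
              omega
            · have : D - 2 + 1 = D - 1 := by omega
              rw [this]
              omega
          rw [htn2, hlog]
          have hstep : D - 2 + 1 = D - 1 := by omega
          rw [hstep]
          have hcong : partSum ((10 : Int) ^ (D - 1) - 1) 1 (D - 1) = partSum n 1 (D - 1) := by
            apply partSum_congr
            · have : 1 + (D - 1) - 1 = D - 1 := by omega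
              rw [this]
            · have : 1 + (D - 1) - 1 = D - 1 := by omega
              rw [this]; omega
          rw [hcong]
          have hlast : partSum n 1 D = partSum n 1 (D - 1) + blockTerm n D := by
            have h' := partSum_succ_right n (D - 1) 1
            have h'' : 1 + (D - 1) = D := by omega
            rw [h''] at h'
            have hD' : D - 1 + 1 = D := by omega
            rw [hD'] at h'
            exact h'
          rw [hlast]
          ring

-- ===== VERDICT (by name: the statement is the Claim_ definition above) =====
theorem count_spec : Claim_equal_count := by
  intro n hdom hpre
  unfold Spec_count
  have hn0 : 0 ≤ n := hpre
  have hub : n ≤ 2147483648 := by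
    have := of_decide_eq_true hdom
    exact this.2
  have h10 : n < (10 : Int) ^ 10 := by
    have : (10 : Int) ^ 10 = 10000000000 := by norm_num
    omega
  rw [count, countFuel_eq 10 64 n hn0 h10 (by norm_num)]
  by_cases hz : n = 0
  · subst hz
    simp [count_alt]
  · rw [if_neg hz, count_alt, if_neg (by omega)]
    have h1 : 1 ≤ n := by omega
    have hlo : (10 : Int) ^ (1 + Nat.log 10 n.toNat - 1) ≤ n := by
      have := Nat.pow_log_le_self 10 (x := n.toNat) (by omega)
      have h2 : ((10 ^ Nat.log 10 n.toNat : Nat) : Int) ≤ ((n.toNat : Nat) : Int) := by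
        exact_mod_cast this
      rw [Int.toNat_of_nonneg hn0] at h2
      push_cast at h2
      simpa using h2
    have hhi : n < (10 : Int) ^ (1 + Nat.log 10 n.toNat) := by
      have := Nat.lt_pow_succ_log_self (by norm_num : 1 < 10) n.toNat
      have h2 : ((n.toNat : Nat) : Int) < ((10 ^ (Nat.log 10 n.toNat + 1) : Nat) : Int) := by
        exact_mod_cast this
      rw [Int.toNat_of_nonneg hn0] at h2
      push_cast at h2
      rw [Nat.add_comm]
      exact h2
    have hfuel : Nat.log 10 n.toNat + 1 ≤ 64 := by
      have hnd : n.toNat < 10 ^ 11 := by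
        have : ((n.toNat : Nat) : Int) < ((10 ^ 11 : Nat) : Int) := by
          rw [Int.toNat_of_nonneg hn0]; push_cast; omega
        exact_mod_cast this
      have := (Nat.log_lt_iff_lt_pow (by norm_num : 1 < 10) (by omega : n.toNat ≠ 0)).mpr hnd
      omega
    have hspec := altLoop_spec (Nat.log 10 n.toNat) 64 1 0 n hfuel le_rfl hlo hhi
    norm_num at hspec
    rw [hspec]
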